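-- pv_equiv track=rewrite | github.com/vahndi/probability | probability/discrete/prob_utils.py | valid_name_comparator
-- ===== SOURCE A (Python) =====
-- from typing import Any, Tuple, List
--
-- _match_codes: List[str] = ['eq', 'ne', 'lt', 'gt', 'le', 'ge', 'in', 'not_in']
--
-- def valid_name_comparator(name_comparator: str, var_names: List[str]) -> bool:
--     """
--     Return whether the given name is a valid conditioning filter name for any of
--     the variables in var_names.
--
--     :param name_comparator: Amalgamation of variable name and filtering
--                             comparator in the form '{name}__{comparator}'.
--     :param var_names: List of valid variables names to look for in
--                       `name_comparator`.
--     """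
--     for var_name in var_names:
--         if name_comparator == var_name:
--             return True
--     for var_name in var_names:
--         for code in _match_codes:
--             if name_comparator == var_name + '__' + code:
--                 return True
--     return False
-- ===== SOURCE B (Python) =====
-- from typing import List
--
-- _match_codes: List[str] = ['eq', 'ne', 'lt', 'gt', 'le', 'ge', 'in', 'not_in']
--
-- def valid_name_comparator(name_comparator: str, var_names: List[str]) -> bool:
--     names = set(var_names)
--     if name_comparator in names:
--         return True
--     for code in _match_codes:
--         suffix = '__' + code
--         if name_comparator.endswith(suffix):
--             if name_comparator[:-len(suffix)] in names:
--                 return True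
--     return False
-- ===== Notes on version B (the rewrite author's own statement) =====
-- stated objective: faster
-- what changed: Instead of generating every candidate string name+'__'+code for every var_name and comparing (A's nested loops over var_names x codes), B builds a set of var_names once and loops only over the 8 fixed codes, stripping a matching '__code' suffix and doing one set lookup.
import Mathlib
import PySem

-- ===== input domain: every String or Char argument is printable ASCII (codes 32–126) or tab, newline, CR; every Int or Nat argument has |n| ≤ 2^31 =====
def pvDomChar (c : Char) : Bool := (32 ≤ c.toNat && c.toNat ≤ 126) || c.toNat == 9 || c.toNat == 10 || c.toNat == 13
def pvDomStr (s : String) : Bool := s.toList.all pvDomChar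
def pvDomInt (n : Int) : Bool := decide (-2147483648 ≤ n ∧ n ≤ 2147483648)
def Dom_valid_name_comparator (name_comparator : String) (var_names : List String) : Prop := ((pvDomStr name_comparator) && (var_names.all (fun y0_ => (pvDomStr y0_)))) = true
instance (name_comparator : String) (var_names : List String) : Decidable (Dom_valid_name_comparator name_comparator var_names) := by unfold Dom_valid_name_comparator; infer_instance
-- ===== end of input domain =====

-- B replaces A's nested loops over var_names × codes with one set of var_names
-- and a loop over the 8 fixed codes (strip '__code' suffix, one set lookup): faster.


-- ===== PORT A =====
-- module constant _match_codes
def pvMatchCodesA : List String := ["eq", "ne", "lt", "gt", "le", "ge", "in", "not_in"]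

-- first loop (early-return True) = .any; second nested loop = nested .any
def valid_name_comparator (name_comparator : String) (var_names : List String) : Bool :=
  (var_names.any (fun var_name => name_comparator == var_name)) ||
  (var_names.any (fun var_name =>
    pvMatchCodesA.any (fun code => name_comparator == var_name ++ "__" ++ code)))

-- ===== PORT B =====
def pvMatchCodesB : List String := ["eq", "ne", "lt", "gt", "le", "ge", "in", "not_in"]

-- set built once; early membership return; then loop over codes, strip suffix, look up
def valid_name_comparator_alt (name_comparator : String) (var_names : List String) : Bool :=
  let names : PySem.Set String := PySem.Set.ofList var_names
  (PySem.Set.contains names name_comparator) ||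
  (pvMatchCodesB.any (fun code =>
    let suffix := "__" ++ code
    PySem.Str.endswith name_comparator suffix &&
      PySem.Set.contains names
        (PySem.Str.slice name_comparator none (some (-(PySem.Str.len suffix))))))

-- ===== PRECONDITION & SPEC =====
def Spec_valid_name_comparator (name_comparator : String) (var_names : List String) (out : Bool) : Prop := out = valid_name_comparator_alt name_comparator var_names
instance (name_comparator : String) (var_names : List String) (out : Bool) : Decidable (Spec_valid_name_comparator name_comparator var_names out) := by unfold Spec_valid_name_comparator; infer_instance

-- ===== CLAIM (what is proved, stated in full; the proofs are below) =====
def Claim_equal_valid_name_comparator : Prop := ∀ (name_comparator : String) (var_names : List String), Dom_valid_name_comparator name_comparator var_names → Spec_valid_name_comparator name_comparator var_names (valid_name_comparator name_comparator var_names)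

-- ===== LEMMAS AND PROOFS =====

-- For one fixed code: "nc equals some var_name + '__' + code" is exactly
-- "nc ends with '__' + code and stripping that suffix leaves a var_name".
lemma pv_code_iff (nc : String) (vns : List String) (c : String) :
    (∃ v ∈ vns, nc = v ++ ("__" ++ c)) ↔
      (PySem.Str.endswith nc ("__" ++ c) = true ∧
        PySem.Str.slice nc none (some (-(PySem.Str.len ("__" ++ c)))) ∈ vns) := by
  have hk : 0 < ("__" ++ c).toList.length := by
    simp [String.toList_append]
  have hslice : (PySem.Str.slice nc none (some (-(PySem.Str.len ("__" ++ c))))).toList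
      = nc.toList.take (nc.toList.length - ("__" ++ c).toList.length) := by
    rw [PySem.Str.len_eq, PySem.Str.toList_slice, PySem.Chars.slice_eq_listSlice,
        PySem.List.slice_to_neg_natCast _ _ hk]
  constructor
  · rintro ⟨v, hv, rfl⟩
    have hl : (v ++ ("__" ++ c)).toList = v.toList ++ ("__" ++ c).toList :=
      String.toList_append
    refine ⟨?_, ?_⟩
    · rw [PySem.Str.endswith_eq, PySem.Chars.endswith_iff, hl]
      exact List.suffix_append _ _
    · have : (PySem.Str.slice (v ++ ("__" ++ c)) none
          (some (-(PySem.Str.len ("__" ++ c))))).toList = v.toList := by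
        rw [hslice, hl]
        simp
      have := String.toList_inj.mp this
      rwa [this]
  · rintro ⟨hsuf, hmem⟩
    rw [PySem.Str.endswith_eq, PySem.Chars.endswith_iff] at hsuf
    obtain ⟨t, ht⟩ := hsuf
    refine ⟨_, hmem, ?_⟩
    apply String.toList_inj.mp
    rw [String.toList_append, hslice, ← ht]
    simp
-- ===== VERDICT (by name: the statement is the Claim_ definition above) =====
theorem valid_name_comparator_spec : Claim_equal_valid_name_comparator := by
  intro nc vns _
  unfold Spec_valid_name_comparator valid_name_comparator valid_name_comparator_alt
  rw [Bool.eq_iff_iff]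
  simp only [Bool.or_eq_true, List.any_eq_true, beq_iff_eq, Bool.and_eq_true,
    PySem.Set.contains_iff, PySem.Set.mem_ofList, String.append_assoc]
  apply or_congr
  · exact ⟨fun ⟨v, hv, e⟩ => e ▸ hv, fun h => ⟨nc, h, rfl⟩⟩
  · constructor
    · rintro ⟨v, hv, c, hc, e⟩
      exact ⟨c, hc, (pv_code_iff nc vns c).mp ⟨v, hv, e⟩⟩
    · rintro ⟨c, hc, h⟩
      obtain ⟨v, hv, e⟩ := (pv_code_iff nc vns c).mpr h
      exact ⟨v, hv, c, hc, e⟩
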